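-- pv_equiv track=rewrite | github.com/d0scoo1/Naga | tools/etherscan_spider/3_raw_parser.py | _solname_conflict
-- ===== SOURCE A (Python) =====
-- def _solname_conflict(sourceCode):
--     soln_keys = {}
--     sol_files = {}
--     for key in sourceCode:
--         soln = _get_solname_sol(key)
--         if soln in soln_keys:
--             key1 = soln_keys[soln]
--             if len(sourceCode[key]['content']) < len(sourceCode[key1]['content']): # leave the file that has the max length
--                 continue
--         soln_keys[soln] = key
--         sol_files[soln] = sourceCode[key]['content']
--
--     return sol_files
--
-- def __get_solname(path):
--     solname = ''
--     if '/' not in path: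
--         solname = path
--     else:
--         solname = path.split('/')[-1]
--
--     return solname.split('.sol')[0]
--
-- def _get_solname_sol(path):
--     return __get_solname(path) + '.sol'
-- ===== SOURCE B (Python) =====
-- def __get_solname(path):
--     solname = ''
--     if '/' not in path:
--         solname = path
--     else:
--         solname = path.split('/')[-1]
--
--     return solname.split('.sol')[0]
--
-- def _get_solname_sol(path):
--     return __get_solname(path) + '.sol'
--
-- def _solname_conflict(sourceCode):
--     # group contents by solidity filename, then pick the longest (last on ties)
--     groups = {}
--     for key, val in sourceCode.items():
--         groups.setdefault(_get_solname_sol(key), []).append(val['content'])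
--     sol_files = {}
--     for soln, contents in groups.items():
--         best = contents[0]
--         for c in contents[1:]:
--             if len(c) >= len(best):
--                 best = c
--         sol_files[soln] = best
--     return sol_files
-- ===== Notes on version B (the rewrite author's own statement) =====
-- stated objective: alternative
-- what changed: A keeps a running best per solname in one pass over the keys (soln_keys/sol_files dicts updated in place); B first groups all contents by solname, then a second pass picks each group's longest content (last on ties).
import Mathlib
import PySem

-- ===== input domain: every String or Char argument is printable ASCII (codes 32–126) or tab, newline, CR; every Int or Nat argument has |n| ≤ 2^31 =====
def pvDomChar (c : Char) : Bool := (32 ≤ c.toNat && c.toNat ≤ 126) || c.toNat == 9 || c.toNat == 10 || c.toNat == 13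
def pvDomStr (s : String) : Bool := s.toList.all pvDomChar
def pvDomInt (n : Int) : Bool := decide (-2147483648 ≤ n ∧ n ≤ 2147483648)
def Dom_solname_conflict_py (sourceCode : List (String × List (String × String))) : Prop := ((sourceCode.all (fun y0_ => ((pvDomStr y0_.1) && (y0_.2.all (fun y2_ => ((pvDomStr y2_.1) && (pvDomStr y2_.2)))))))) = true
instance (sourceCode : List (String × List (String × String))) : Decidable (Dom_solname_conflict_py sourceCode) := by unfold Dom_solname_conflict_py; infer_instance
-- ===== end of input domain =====

-- B groups contents by solidity filename in one pass, then picks each group's longest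
-- content (last on ties) in a second pass — a two-pass decomposition of A's single
-- running-best loop; same cost, no speed claim.

-- ===== PORT A =====
-- shared helper: Python __get_solname
def get_solname_py (path : String) : String :=
  let solname :=
    if !(PySem.Str.isIn "/" path) then path
    else (PySem.List.pyGet? ((PySem.Str.split? path "/").getD []) (-1)).getD ""
  (PySem.List.pyGet? ((PySem.Str.split? solname ".sol").getD []) 0).getD ""

-- shared helper: Python _get_solname_sol
def get_solname_sol_py (path : String) : String := get_solname_py path ++ ".sol"

-- sourceCode[key]['content'] : first-match association-list lookups (dict lookups; Pre_ makes them total)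
def contentOf (v : List (String × String)) : String :=
  ((v.find? (fun p => p.1 == "content")).map (fun p => p.2)).getD ""

def dictGet (S : List (String × List (String × String))) (key : String) : List (String × String) :=
  ((S.find? (fun p => p.1 == key)).map (fun p => p.2)).getD []

-- one iteration of A's loop over the keys, state (soln_keys, sol_files)
def stepA (S : List (String × List (String × String)))
    (st : PySem.Dict String String × PySem.Dict String String)
    (kv : String × List (String × String)) :
    PySem.Dict String String × PySem.Dict String String :=
  let soln := get_solname_sol_py kv.1
  match st.1.get? soln with
  | some key1 =>
      if PySem.Str.len (contentOf (dictGet S kv.1)) < PySem.Str.len (contentOf (dictGet S key1)) then st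
      else (st.1.insert soln kv.1, st.2.insert soln (contentOf (dictGet S kv.1)))
  | none => (st.1.insert soln kv.1, st.2.insert soln (contentOf (dictGet S kv.1)))

def solname_conflict_py (sourceCode : List (String × List (String × String))) : List (String × String) :=
  ((sourceCode.foldl (stepA sourceCode) (PySem.Dict.empty, PySem.Dict.empty)).2).items

-- ===== PORT B =====
-- inner loop of B's second pass: best = contents[0]; for c in contents[1:]: if len(c) >= len(best): best = c
def pickBest (cs : List String) : String :=
  match cs with
  | [] => ""
  | c0 :: rest => rest.foldl (fun best c => if PySem.Str.len best ≤ PySem.Str.len c then c else best) c0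

-- B's first pass: groups.setdefault(soln, []).append(val['content'])
def groupsOf (sourceCode : List (String × List (String × String))) : PySem.Dict String (List String) :=
  sourceCode.foldl
    (fun g kv => g.modify (get_solname_sol_py kv.1) [] (fun cs => cs ++ [contentOf kv.2]))
    PySem.Dict.empty

def solname_conflict_py_alt (sourceCode : List (String × List (String × String))) : List (String × String) :=
  ((groupsOf sourceCode).items.foldl
    (fun d p => d.insert p.1 (pickBest p.2)) PySem.Dict.empty).items

-- ===== PRECONDITION & SPEC =====
-- Pre_ excludes (a) association lists with duplicate outer keys, which do not arise from a Python
-- dict argument (a dict's keys are unique), and (b) inputs where some value lacks the 'content'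
-- key, on which Python A raises KeyError.
def Pre_solname_conflict_py (sourceCode : List (String × List (String × String))) : Prop :=
  (sourceCode.map Prod.fst).Nodup ∧
  ∀ kv ∈ sourceCode, (kv.2.find? (fun p => p.1 == "content")).isSome = true
instance (sourceCode : List (String × List (String × String))) : Decidable (Pre_solname_conflict_py sourceCode) := by
  unfold Pre_solname_conflict_py; infer_instance

def pvWitness_solname_conflict_py : (List (String × List (String × String))) :=
  [("x/a.sol", [("content", "hello")]), ("a.sol", [("content", "hi")]), ("b", [("content", "z")])]

def Spec_solname_conflict_py (sourceCode : List (String × List (String × String))) (out : List (String × String)) : Prop := out = solname_conflict_py_alt sourceCode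
instance (sourceCode : List (String × List (String × String))) (out : List (String × String)) : Decidable (Spec_solname_conflict_py sourceCode out) := by unfold Spec_solname_conflict_py; infer_instance

-- ===== CLAIM (what is proved, stated in full; the proofs are below) =====
def Claim_equal_solname_conflict_py : Prop := ∀ (sourceCode : List (String × List (String × String))), Dom_solname_conflict_py sourceCode → Pre_solname_conflict_py sourceCode → Spec_solname_conflict_py sourceCode (solname_conflict_py sourceCode)

-- ===== LEMMAS AND PROOFS =====

-- proof-only normal form: A's sol_files loop with each key's content read off its own pair
def stepN (d : PySem.Dict String String) (kv : String × List (String × String)) :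
    PySem.Dict String String :=
  let soln := get_solname_sol_py kv.1
  match d.get? soln with
  | some b => if PySem.Str.len (contentOf kv.2) < PySem.Str.len b then d
              else d.insert soln (contentOf kv.2)
  | none => d.insert soln (contentOf kv.2)

def nf (l : List (String × List (String × String))) : PySem.Dict String String :=
  l.foldl stepN PySem.Dict.empty

theorem find_self_of_nodup (S : List (String × List (String × String)))
    (hS : (S.map Prod.fst).Nodup) (kv : String × List (String × String)) (h : kv ∈ S) :
    S.find? (fun p => p.1 == kv.1) = some kv := by
  induction S with
  | nil => cases h
  | cons p T ih =>
    rw [List.map_cons, List.nodup_cons] at hS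
    rcases List.mem_cons.mp h with rfl | hmem
    · simp
    · have hne : (p.1 == kv.1) = false := by
        simp only [beq_eq_false_iff_ne]
        intro he
        exact hS.1 (he ▸ List.mem_map_of_mem hmem)
      rw [List.find?_cons_of_neg (by simp [hne]), ih hS.2 hmem]

theorem dictGet_self (S : List (String × List (String × String)))
    (hS : (S.map Prod.fst).Nodup) (kv : String × List (String × String)) (h : kv ∈ S) :
    dictGet S kv.1 = kv.2 := by
  rw [dictGet, find_self_of_nodup S hS kv h]; rfl

theorem pickBest_append (cs : List String) (c : String) (h : cs ≠ []) :
    pickBest (cs ++ [c]) =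
      if PySem.Str.len (pickBest cs) ≤ PySem.Str.len c then c else pickBest cs := by
  cases cs with
  | nil => exact absurd rfl h
  | cons c0 rest => simp [pickBest, List.foldl_append]

-- invariant linking A's pair-state fold to the normal form nf
theorem A_to_nf (S : List (String × List (String × String)))
    (hS : (S.map Prod.fst).Nodup) :
    ∀ l, (∀ x ∈ l, x ∈ S) →
      (l.foldl (stepA S) (PySem.Dict.empty, PySem.Dict.empty)).2 = nf l ∧
      ∀ s, ((l.foldl (stepA S) (PySem.Dict.empty, PySem.Dict.empty)).1.get? s).map
             (fun key => contentOf (dictGet S key)) = (nf l).get? s := by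
  intro l
  induction l using List.reverseRecOn with
  | nil =>
    intro _
    exact ⟨rfl, fun s => by simp [nf, PySem.Dict.get?_empty]⟩
  | append_singleton xs kv ih =>
    intro hsub
    have hsub' : ∀ x ∈ xs, x ∈ S := fun x hx => hsub x (List.mem_append_left _ hx)
    have hkvS : kv ∈ S := hsub kv (List.mem_append_right _ (List.mem_singleton.mpr rfl))
    obtain ⟨h2, h1⟩ := ih hsub'
    have hc' : contentOf (dictGet S kv.1) = contentOf kv.2 := by
      rw [dictGet_self S hS kv hkvS]
    have hfold : (xs ++ [kv]).foldl (stepA S) (PySem.Dict.empty, PySem.Dict.empty)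
        = stepA S (xs.foldl (stepA S) (PySem.Dict.empty, PySem.Dict.empty)) kv := by
      simp [List.foldl_append]
    have hNn : nf (xs ++ [kv]) = stepN (nf xs) kv := by
      simp [nf, List.foldl_append]
    cases hb : (xs.foldl (stepA S) (PySem.Dict.empty, PySem.Dict.empty)).1.get?
        (get_solname_sol_py kv.1) with
    | none =>
      have hbn : (nf xs).get? (get_solname_sol_py kv.1) = none := by
        rw [← h1, hb]; rfl
      refine ⟨?_, fun s => ?_⟩
      · rw [hfold, stepA, hb]
        dsimp only
        rw [hNn, stepN, hbn]
        dsimp only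
        rw [h2, hc']
      · rw [hfold, stepA, hb]
        dsimp only
        rw [hNn, stepN, hbn]
        dsimp only
        by_cases hss : s = get_solname_sol_py kv.1
        · rw [hss, PySem.Dict.get?_insert_self, PySem.Dict.get?_insert_self,
              Option.map_some, hc']
        · rw [PySem.Dict.get?_insert, if_neg hss, PySem.Dict.get?_insert, if_neg hss]
          exact h1 s
    | some key1 =>
      have hbs : (nf xs).get? (get_solname_sol_py kv.1) = some (contentOf (dictGet S key1)) := by
        rw [← h1, hb]; rfl
      refine ⟨?_, fun s => ?_⟩
      · rw [hfold, stepA, hb]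
        dsimp only
        rw [hNn, stepN, hbs]
        dsimp only
        rw [hc']
        by_cases hlt : PySem.Str.len (contentOf kv.2) < PySem.Str.len (contentOf (dictGet S key1))
        · rw [if_pos hlt, if_pos hlt, h2]
        · rw [if_neg hlt, if_neg hlt]
          dsimp only
          rw [h2]
      · rw [hfold, stepA, hb]
        dsimp only
        rw [hNn, stepN, hbs]
        dsimp only
        rw [hc']
        by_cases hlt : PySem.Str.len (contentOf kv.2) < PySem.Str.len (contentOf (dictGet S key1))
        · rw [if_pos hlt, if_pos hlt]
          exact h1 s
        · rw [if_neg hlt, if_neg hlt]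
          dsimp only
          by_cases hss : s = get_solname_sol_py kv.1
          · rw [hss, PySem.Dict.get?_insert_self, PySem.Dict.get?_insert_self,
                Option.map_some, hc']
          · rw [PySem.Dict.get?_insert, if_neg hss, PySem.Dict.get?_insert, if_neg hss]
            exact h1 s

-- reduction lemmas for stepN
theorem stepN_get? (d : PySem.Dict String String) (kv : String × List (String × String)) (s : String) :
    (stepN d kv).get? s =
      if s = get_solname_sol_py kv.1 then
        match d.get? (get_solname_sol_py kv.1) with
        | none => some (contentOf kv.2)
        | some b => if PySem.Str.len (contentOf kv.2) < PySem.Str.len b then some b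
                    else some (contentOf kv.2)
      else d.get? s := by
  cases hb : d.get? (get_solname_sol_py kv.1) with
  | none =>
    rw [stepN, hb]
    dsimp only
    by_cases hss : s = get_solname_sol_py kv.1
    · rw [if_pos hss, hss, PySem.Dict.get?_insert_self]
    · rw [if_neg hss, PySem.Dict.get?_insert, if_neg hss]
  | some b =>
    rw [stepN, hb]
    dsimp only
    by_cases hlt : PySem.Str.len (contentOf kv.2) < PySem.Str.len b
    · rw [if_pos hlt]
      by_cases hss : s = get_solname_sol_py kv.1
      · rw [if_pos hss, if_pos hlt, hss, hb]
      · rw [if_neg hss]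
    · rw [if_neg hlt]
      by_cases hss : s = get_solname_sol_py kv.1
      · rw [if_pos hss, if_neg hlt, hss, PySem.Dict.get?_insert_self]
      · rw [if_neg hss, PySem.Dict.get?_insert, if_neg hss]

theorem stepN_keys (d : PySem.Dict String String) (kv : String × List (String × String)) :
    (stepN d kv).keys =
      if d.contains (get_solname_sol_py kv.1) then d.keys
      else d.keys ++ [get_solname_sol_py kv.1] := by
  cases hb : d.get? (get_solname_sol_py kv.1) with
  | none =>
    have hc : d.contains (get_solname_sol_py kv.1) = false :=
      (PySem.Dict.get?_eq_none_iff_contains _ _).mp hb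
    rw [stepN, hb]
    dsimp only
    rw [PySem.Dict.keys_insert_of_not_contains _ _ hc, hc, if_neg (by simp)]
  | some b =>
    have hc : d.contains (get_solname_sol_py kv.1) = true := by
      cases h' : d.contains (get_solname_sol_py kv.1) with
      | false => rw [(PySem.Dict.get?_eq_none_iff_contains _ _).mpr h'] at hb; cases hb
      | true => rfl
    rw [stepN, hb, if_pos hc]
    dsimp only
    by_cases hlt : PySem.Str.len (contentOf kv.2) < PySem.Str.len b
    · rw [if_pos hlt]
    · rw [if_neg hlt, PySem.Dict.keys_insert_of_contains _ _ hc]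

-- invariant linking the normal form to B's grouping dict
theorem nf_to_groups (l : List (String × List (String × String))) :
    (nf l).keys = (groupsOf l).keys ∧
    ∀ s, (nf l).get? s = ((groupsOf l).get? s).map pickBest ∧
         (∀ cs, (groupsOf l).get? s = some cs → cs ≠ []) := by
  induction l using List.reverseRecOn with
  | nil =>
    refine ⟨by simp [nf, groupsOf], fun s => ⟨by simp [nf, groupsOf], fun cs hcs => ?_⟩⟩
    simp [groupsOf] at hcs
  | append_singleton xs kv ih =>
    obtain ⟨hk, hg⟩ := ih
    have hN : nf (xs ++ [kv]) = stepN (nf xs) kv := by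
      simp [nf, List.foldl_append]
    have hGmod : ∀ s, (groupsOf (xs ++ [kv])).get? s =
        if s = get_solname_sol_py kv.1
        then some ((groupsOf xs).getD (get_solname_sol_py kv.1) [] ++ [contentOf kv.2])
        else (groupsOf xs).get? s := by
      intro s
      have hG : groupsOf (xs ++ [kv]) =
          (groupsOf xs).modify (get_solname_sol_py kv.1) [] (fun cs => cs ++ [contentOf kv.2]) := by
        simp [groupsOf, List.foldl_append]
      rw [hG, PySem.Dict.modify, PySem.Dict.get?_insert]
    have hcont : (nf xs).contains (get_solname_sol_py kv.1)
        = (groupsOf xs).contains (get_solname_sol_py kv.1) := by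
      cases hb : (groupsOf xs).contains (get_solname_sol_py kv.1) with
      | true =>
        rw [PySem.Dict.contains_iff_mem_keys, hk, ← PySem.Dict.contains_iff_mem_keys, hb]
      | false =>
        have : ¬ (nf xs).contains (get_solname_sol_py kv.1) = true := by
          rw [PySem.Dict.contains_iff_mem_keys, hk, ← PySem.Dict.contains_iff_mem_keys, hb]
          simp
        simpa using this
    refine ⟨?_, fun s => ⟨?_, fun cs hcs => ?_⟩⟩
    · -- keys
      have hGk : (groupsOf (xs ++ [kv])).keys =
          if (groupsOf xs).contains (get_solname_sol_py kv.1) then (groupsOf xs).keys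
          else (groupsOf xs).keys ++ [get_solname_sol_py kv.1] := by
        have hG : groupsOf (xs ++ [kv]) =
            (groupsOf xs).modify (get_solname_sol_py kv.1) [] (fun cs => cs ++ [contentOf kv.2]) := by
          simp [groupsOf, List.foldl_append]
        rw [hG, PySem.Dict.keys_modify]
        cases hb : (groupsOf xs).contains (get_solname_sol_py kv.1) with
        | true => rw [PySem.Dict.keys_insert_of_contains _ _ hb, if_pos rfl]
        | false => rw [PySem.Dict.keys_insert_of_not_contains _ _ hb, if_neg (by simp)]
      rw [hN, stepN_keys, hGk, hcont, hk]
    · -- get?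
      rw [hN, stepN_get?, hGmod s]
      by_cases hss : s = get_solname_sol_py kv.1
      · rw [if_pos hss, if_pos hss]
        cases hb : (nf xs).get? (get_solname_sol_py kv.1) with
        | none =>
          have hbG : (groupsOf xs).get? (get_solname_sol_py kv.1) = none := by
            have h1 := (hg (get_solname_sol_py kv.1)).1
            rw [hb] at h1
            exact (Option.map_eq_none_iff).mp h1.symm
          rw [PySem.Dict.getD_of_get?_eq_none _ _ hbG]
          simp [pickBest]
        | some b =>
          obtain ⟨cs0, hcs0⟩ : ∃ cs0, (groupsOf xs).get? (get_solname_sol_py kv.1) = some cs0 := by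
            have h1 := (hg (get_solname_sol_py kv.1)).1
            rw [hb] at h1
            cases h2 : (groupsOf xs).get? (get_solname_sol_py kv.1) with
            | none => rw [h2] at h1; cases h1
            | some cs0 => exact ⟨cs0, rfl⟩
          have hbp : b = pickBest cs0 := by
            have h1 := (hg (get_solname_sol_py kv.1)).1
            rw [hb, hcs0] at h1
            exact Option.some.inj h1
          have hne0 : cs0 ≠ [] := (hg (get_solname_sol_py kv.1)).2 cs0 hcs0
          rw [PySem.Dict.getD_of_get?_eq_some _ _ hcs0, Option.map_some,
              pickBest_append cs0 (contentOf kv.2) hne0, ← hbp]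
          dsimp only
          by_cases hlt : PySem.Str.len (contentOf kv.2) < PySem.Str.len b
          · rw [if_pos hlt, if_neg (by omega)]
          · rw [if_neg hlt, if_pos (by omega)]
      · rw [if_neg hss, if_neg hss]
        exact (hg s).1
    · -- nonempty groups
      rw [hGmod s] at hcs
      by_cases hss : s = get_solname_sol_py kv.1
      · rw [if_pos hss] at hcs
        cases hcs
        simp
      · rw [if_neg hss] at hcs
        exact (hg s).2 cs hcs

-- ===== VERDICT (by name: the statement is the Claim_ definition above) =====
theorem solname_conflict_py_spec : Claim_equal_solname_conflict_py := by
  intro S hDom hPre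
  unfold Spec_solname_conflict_py
  obtain ⟨hNodup, -⟩ := hPre
  obtain ⟨hA2, -⟩ := A_to_nf S hNodup S (fun x hx => hx)
  have hAeq : solname_conflict_py S = (nf S).items := by
    rw [solname_conflict_py, hA2]
  obtain ⟨hk, hg⟩ := nf_to_groups S
  have hGnodup : (groupsOf S).keys.Nodup :=
    PySem.Dict.nodup_keys_foldl_modify_key S (fun kv => get_solname_sol_py kv.1) []
      (fun _ x cs => cs ++ [contentOf x.2]) PySem.Dict.empty PySem.Dict.nodup_keys_empty
  have hNnodup : (nf S).keys.Nodup := hk ▸ hGnodup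
  have hBeq : solname_conflict_py_alt S
      = (groupsOf S).items.map (fun p => (p.1, pickBest p.2)) := by
    rw [solname_conflict_py_alt,
        PySem.Dict.items_foldl_insert_fresh (groupsOf S).items (fun p => p.1)
          (fun p => pickBest p.2) PySem.Dict.empty
          (fun a _ => PySem.Dict.contains_empty _)
          (by simpa [PySem.Dict.keys] using hGnodup)]
    rfl
  rw [hAeq, hBeq, PySem.Dict.items_eq_map_keys (nf S) hNnodup "",
      PySem.Dict.items_eq_map_keys (groupsOf S) hGnodup [], hk, List.map_map]
  apply List.map_congr_left
  intro s hs
  have hcontG : (groupsOf S).contains s = true := (PySem.Dict.contains_iff_mem_keys _ _).mpr hs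
  obtain ⟨cs, hcs⟩ : ∃ cs, (groupsOf S).get? s = some cs := by
    cases h' : (groupsOf S).get? s with
    | none => rw [(PySem.Dict.get?_eq_none_iff_contains _ _).mp h'] at hcontG; cases hcontG
    | some cs => exact ⟨cs, rfl⟩
  have hnf : (nf S).get? s = some (pickBest cs) := by
    rw [(hg s).1, hcs]; rfl
  simp [PySem.Dict.getD_of_get?_eq_some _ _ hnf, PySem.Dict.getD_of_get?_eq_some _ _ hcs]
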